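-- pv_equiv track=rewrite | github.com/dapper91/contests | geeksforgeeks/string-conversion.py | is_string_convertable
-- ===== SOURCE A (Python) =====
-- def is_string_convertable(x, y):
--     xi, yi = 0, 0
--     indexes = []
--
--     while True:
--         if yi == len(y):
--             break
--
--         if xi == len(x):
--             if len(indexes) == 0:
--                 break
--             else:
--                 xi = indexes.pop() + 1
--                 yi -= 1
--                 continue
--
--         if x[xi].upper() == y[yi]:
--             indexes.append(xi)
--             xi += 1; yi += 1
--         else:
--             if x[xi].isupper():
--                 if len(indexes) == 0:
--                     break
--                 else:
--                     xi = indexes.pop() + 1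
--                     yi -= 1
--             else:
--                 xi += 1
--
--     return len(indexes) == len(y)
-- ===== SOURCE B (Python) =====
-- def is_string_convertable(x, y):
--     m = len(y)
--     if m == 0:
--         return True
--     masks = {}
--     for j, c in enumerate(y):
--         masks[c] = masks.get(c, 0) | (1 << j)
--     goal = 1 << m
--     reach = 1  # bit j set <=> the first j characters of y are matchable so far
--     for a in x:
--         mask = masks.get(a.upper(), 0)
--         matched = (reach & mask) << 1
--         reach = matched | ((reach & mask) if a.isupper() else reach)
--         if reach & goal:
--             return True
--     return False
-- ===== Notes on version B (the rewrite author's own statement) =====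
-- stated objective: alternative
-- what changed: Replaces A's backtracking search over an explicit index stack (exponential worst case) by a bitmask NFA simulation: one left-to-right pass over x maintaining the set of matchable y-prefix lengths as an integer bitset, with masks per character precomputed from y.
import Mathlib
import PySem

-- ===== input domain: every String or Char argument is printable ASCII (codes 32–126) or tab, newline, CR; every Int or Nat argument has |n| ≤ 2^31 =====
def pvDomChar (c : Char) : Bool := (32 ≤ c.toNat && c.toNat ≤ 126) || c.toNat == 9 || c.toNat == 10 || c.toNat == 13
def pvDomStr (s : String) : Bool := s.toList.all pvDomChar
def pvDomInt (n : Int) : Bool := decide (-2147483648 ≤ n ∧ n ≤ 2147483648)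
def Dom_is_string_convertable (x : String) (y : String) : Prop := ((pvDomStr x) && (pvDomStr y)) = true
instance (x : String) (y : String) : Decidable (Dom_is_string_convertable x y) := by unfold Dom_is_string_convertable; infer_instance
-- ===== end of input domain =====

-- B replaces A's backtracking search (explicit index stack) by a one-pass bitmask simulation of the set of matchable y-prefix lengths; same return value on every input.


-- ===== PORT A =====
-- A's `while True` backtracking loop, transliterated step for step with a fuel parameter;
-- the fuel (n+1)^(m+2) is proved sufficient below (the loop state strictly increases in a
-- lexicographic numeric encoding bounded by that number), so the fuel-0 branch never fires.
-- Every `break` returns Python's final `len(indexes) == len(y)`; `indexes.pop()` is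
-- getLastD/dropLast (stack is nonempty there); x[xi] / y[yi] are read with getD, in range
-- at those program points (xi ≠ len x, yi ≠ len y, and neither cursor ever exceeds its length).
def pvLoopA (xl yl : List Char) : Nat → Nat → Nat → List Nat → Bool
  | 0, _, _, s => s.length == yl.length
  | fuel+1, xi, yi, s =>
    if yi == yl.length then s.length == yl.length
    else if xi == xl.length then
      if s.length == 0 then s.length == yl.length
      else pvLoopA xl yl fuel (s.getLastD 0 + 1) (yi - 1) s.dropLast
    else
      let c := xl.getD xi ' '
      if PySem.Chars.upperChar c == yl.getD yi ' ' then
        pvLoopA xl yl fuel (xi+1) (yi+1) (s ++ [xi])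
      else if PySem.Chars.isupper c then
        if s.length == 0 then s.length == yl.length
        else pvLoopA xl yl fuel (s.getLastD 0 + 1) (yi - 1) s.dropLast
      else pvLoopA xl yl fuel (xi+1) yi s

def is_string_convertable (x : String) (y : String) : Bool :=
  pvLoopA x.toList y.toList ((x.toList.length + 1) ^ (y.toList.length + 2)) 0 0 []

-- ===== PORT B =====
-- Source B builds `masks`: for each character c of y, a bitmask of the positions j with y[j] == c
-- (enumerate(y)'s (index, char) pairs are zipIdx's (char, index) pairs, same traversal).
def pvMasks (yl : List Char) : PySem.Dict Char Nat :=
  yl.zipIdx.foldl (fun d p => d.insert p.1 (d.getD p.1 0 ||| (1 <<< p.2))) PySem.Dict.empty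

-- Source B's scan over x: `reach` has bit j set iff y[:j] is matchable against the scanned
-- prefix; a goal-bit hit is Python's truthiness test `if reach & goal: return True`.
def pvLoopB (m : Nat) (masks : PySem.Dict Char Nat) : List Char → Nat → Bool
  | [], _ => false
  | a :: r, reach =>
    let mask := masks.getD (PySem.Chars.upperChar a) 0
    let matched := (reach &&& mask) <<< 1
    let reach' := matched ||| (if PySem.Chars.isupper a then reach &&& mask else reach)
    if reach' &&& (1 <<< m) ≠ 0 then true
    else pvLoopB m masks r reach'

def is_string_convertable_alt (x : String) (y : String) : Bool :=
  if y.toList.length == 0 then true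
  else pvLoopB y.toList.length (pvMasks y.toList) x.toList 1

-- ===== PRECONDITION & SPEC =====
def Spec_is_string_convertable (x : String) (y : String) (out : Bool) : Prop := out = is_string_convertable_alt x y
instance (x : String) (y : String) (out : Bool) : Decidable (Spec_is_string_convertable x y out) := by unfold Spec_is_string_convertable; infer_instance

-- ===== CLAIM (what is proved, stated in full; the proofs are below) =====
def Claim_equal_is_string_convertable : Prop := ∀ (x : String) (y : String), Dom_is_string_convertable x y → Spec_is_string_convertable x y (is_string_convertable x y)

-- ===== LEMMAS AND PROOFS =====

-- the common specification: y (2nd arg) is matchable against x (1st arg), where a character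
-- of x may be matched when its uppercasing equals the current y character, and skipped when
-- it is not uppercase or its uppercasing equals the current y character
def pvConv : List Char → List Char → Bool
  | _, [] => true
  | [], _ :: _ => false
  | a :: xs, c :: ys =>
      (PySem.Chars.upperChar a == c && pvConv xs ys) ||
      ((!PySem.Chars.isupper a || PySem.Chars.upperChar a == c) && pvConv xs (c :: ys))

-- the alternatives still reachable by popping A's stack
def pvAlts (xl yl : List Char) (s : List Nat) : Bool :=
  s.zipIdx.any (fun p => pvConv (xl.drop (p.1 + 1)) (yl.drop p.2))

-- numeric encoding of A's loop state (stack ++ [cursor], base B, padded to m+1 digits):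
-- it strictly increases at every loop step and is bounded, so the fuel suffices
def pvF (B : Nat) (s : List Nat) : Nat := s.foldl (fun a i => a * B + i) 0
def pvV (B m : Nat) (s : List Nat) (xi : Nat) : Nat := (pvF B s * B + xi) * B ^ (m - s.length)

theorem pvF_lt_general (B : Nat) (s : List Nat) (h : ∀ e ∈ s, e < B) :
    ∀ a : Nat, s.foldl (fun a i => a * B + i) a < (a + 1) * B ^ s.length := by
  induction s with
  | nil => intro a; simp
  | cons i s ih =>
    intro a
    have hi : i < B := h i (by simp)
    have := ih (fun e he => h e (by simp [he])) (a * B + i)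
    calc List.foldl (fun a i => a * B + i) (a * B + i) s
        < (a * B + i + 1) * B ^ s.length := this
      _ ≤ ((a + 1) * B) * B ^ s.length := by
          have : a * B + i + 1 ≤ (a + 1) * B := by nlinarith
          exact Nat.mul_le_mul_right _ this
      _ = (a + 1) * B ^ (i :: s).length := by rw [List.length_cons]; ring

theorem pvF_lt (B : Nat) (s : List Nat) (h : ∀ e ∈ s, e < B) : pvF B s < B ^ s.length := by
  have := pvF_lt_general B s h 0
  simpa [pvF] using this

theorem pvF_concat (B : Nat) (s : List Nat) (p : Nat) :
    pvF B (s ++ [p]) = pvF B s * B + p := by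
  simp [pvF, List.foldl_append]

theorem pvV_lt (B m : Nat) (s : List Nat) (xi : Nat)
    (hs : ∀ e ∈ s, e < B) (hxi : xi < B) (hlen : s.length ≤ m) :
    pvV B m s xi < B ^ (m + 1) := by
  have hF := pvF_lt B s hs
  have h1 : pvF B s * B + xi < B ^ (s.length + 1) := by
    have : pvF B s * B + xi < B ^ s.length * B := by nlinarith
    simpa [pow_succ] using this
  have h2 : pvV B m s xi < B ^ (s.length + 1) * B ^ (m - s.length) :=
    (Nat.mul_lt_mul_right (Nat.pow_pos (by omega))).mpr h1
  calc pvV B m s xi < B ^ (s.length + 1) * B ^ (m - s.length) := h2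
    _ = B ^ (m + 1) := by rw [← pow_add]; congr 1; omega

theorem pvV_skip (B m : Nat) (s : List Nat) (xi : Nat) (hB : 0 < B) :
    pvV B m s xi < pvV B m s (xi + 1) := by
  exact (Nat.mul_lt_mul_right (Nat.pow_pos hB)).mpr (by omega)

theorem pvV_push (B m : Nat) (s : List Nat) (xi : Nat) (hB : 0 < B) (hlen : s.length < m) :
    pvV B m s xi < pvV B m (s ++ [xi]) (xi + 1) := by
  unfold pvV
  rw [pvF_concat]
  have he : m - s.length = (m - (s.length + 1)) + 1 := by omega
  rw [he, List.length_append]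
  simp only [List.length_cons, List.length_nil]
  rw [pow_succ]
  calc (pvF B s * B + xi) * (B ^ (m - (s.length + 1)) * B)
      = ((pvF B s * B + xi) * B) * B ^ (m - (s.length + 1)) := by ring
    _ < ((pvF B s * B + xi) * B + (xi + 1)) * B ^ (m - (s.length + 1)) := by
        exact (Nat.mul_lt_mul_right (Nat.pow_pos hB)).mpr (by omega)
    _ = ((pvF B s * B + xi) * B + (xi + 1)) * B ^ (m - (s.length + 1 + 0)) := by norm_num

theorem pvV_pop (B m : Nat) (s' : List Nat) (p xi : Nat) (hxi : xi < B)
    (hlen : s'.length + 1 ≤ m) :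
    pvV B m (s' ++ [p]) xi < pvV B m s' (p + 1) := by
  unfold pvV
  rw [pvF_concat]
  have he : m - s'.length = (m - (s'.length + 1)) + 1 := by omega
  rw [he, List.length_append]
  simp only [List.length_cons, List.length_nil]
  rw [pow_succ]
  calc ((pvF B s' * B + p) * B + xi) * B ^ (m - (s'.length + 1 + 0))
      = ((pvF B s' * B + p) * B + xi) * B ^ (m - (s'.length + 1)) := by norm_num
    _ < ((pvF B s' * B + p) * B + B) * B ^ (m - (s'.length + 1)) := by
        exact (Nat.mul_lt_mul_right (Nat.pow_pos (by omega))).mpr (by omega)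
    _ = (pvF B s' * B + (p + 1)) * (B ^ (m - (s'.length + 1)) * B) := by ring

theorem pvConv_nil_right (xs : List Char) : pvConv xs [] = true := by
  cases xs <;> rfl

theorem pvConv_nil_cons (c : Char) (ys : List Char) : pvConv [] (c :: ys) = false := rfl

theorem pvConv_cons (a : Char) (xs : List Char) (c : Char) (ys : List Char) :
    pvConv (a :: xs) (c :: ys) =
      ((PySem.Chars.upperChar a == c && pvConv xs ys) ||
       ((!PySem.Chars.isupper a || PySem.Chars.upperChar a == c) && pvConv xs (c :: ys))) := rfl

theorem pvAlts_nil (xl yl : List Char) : pvAlts xl yl [] = false := rfl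

theorem pvAlts_concat (xl yl : List Char) (s : List Nat) (p : Nat) :
    pvAlts xl yl (s ++ [p]) =
      (pvAlts xl yl s || pvConv (xl.drop (p + 1)) (yl.drop s.length)) := by
  simp [pvAlts, List.zipIdx_append]

-- A's loop, at any reachable state, returns: success from the current cursors, or success
-- from one of the stacked backtracking alternatives — provided the fuel dominates the
-- remaining budget B^(m+1) - pvV of the strictly increasing state encoding.
theorem pvLoopA_eq (xl yl : List Char) :
    ∀ (fuel xi yi : Nat) (s : List Nat),
      xi ≤ xl.length → s.length = yi → yi ≤ yl.length → (∀ e ∈ s, e < xl.length) →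
      (xl.length + 1) ^ (yl.length + 1) ≤ fuel + pvV (xl.length + 1) yl.length s xi →
      pvLoopA xl yl fuel xi yi s =
        (pvConv (xl.drop xi) (yl.drop yi) || pvAlts xl yl s) := by
  intro fuel
  induction fuel with
  | zero =>
    intro xi yi s hxi hlen hyi hent hfuel
    exfalso
    have := pvV_lt (xl.length + 1) yl.length s xi
      (fun e he => by have := hent e he; omega) (by omega) (by omega)
    omega
  | succ fuel ih =>
    intro xi yi s hxi hlen hyi hent hfuel
    rw [pvLoopA]
    by_cases hym : yi = yl.length
    · subst hym
      simp [hlen, List.drop_length, pvConv_nil_right]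
    · have hylt : yi < yl.length := lt_of_le_of_ne hyi hym
      have hydrop : yl.drop yi = yl[yi] :: yl.drop (yi + 1) := List.drop_eq_getElem_cons hylt
      simp only [show (yi == yl.length) = false by simp [hym], Bool.false_eq_true, if_false]
      by_cases hxn : xi = xl.length
      · simp only [hxn, beq_self_eq_true, if_true]
        by_cases hs0 : s = []
        · subst hs0
          have hm0 : yl.length ≠ 0 := by simp at hlen; omega
          simp only [List.length_nil, beq_self_eq_true, if_true]
          rw [List.drop_length, hydrop]
          simp [pvAlts_nil, show (0 == yl.length) = false by simp [Ne.symm hm0], pvConv]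
        · rcases List.eq_nil_or_concat s with h' | ⟨s', p, h'⟩
          · exact absurd h' hs0
          rw [List.concat_eq_append] at h'
          subst h'
          have hslen : (s' ++ [p]).length = s'.length + 1 := by simp
          have hplt : p < xl.length := hent p (by simp)
          simp only [show ((s' ++ [p]).length == 0) = false by simp, Bool.false_eq_true, if_false,
            List.getLastD_concat, List.dropLast_concat]
          rw [ih (p + 1) (yi - 1) s' (by omega) (by omega) (by omega)
            (fun e he => hent e (by simp [he]))
            (by
              have := pvV_pop (xl.length + 1) yl.length s' p xi (by omega) (by omega)
              omega)]
          rw [pvAlts_concat, List.drop_length, hydrop]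
          have : s'.length = yi - 1 := by omega
          rw [this]
          simp [pvConv, Bool.or_comm]
      · have hxlt : xi < xl.length := lt_of_le_of_ne hxi hxn
        have hxdrop : xl.drop xi = xl[xi] :: xl.drop (xi + 1) := List.drop_eq_getElem_cons hxlt
        have hcx : xl.getD xi ' ' = xl[xi] := List.getD_eq_getElem xl ' ' hxlt
        have hcy : yl.getD yi ' ' = yl[yi] := List.getD_eq_getElem yl ' ' hylt
        simp only [show (xi == xl.length) = false by simp [hxn], Bool.false_eq_true, if_false,
          hcx, hcy]
        by_cases hm : PySem.Chars.upperChar xl[xi] == yl[yi]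
        · simp only [hm, if_true]
          rw [ih (xi + 1) (yi + 1) (s ++ [xi]) (by omega) (by simp; omega) (by omega)
            (by
              intro e he
              simp only [List.mem_append, List.mem_singleton] at he
              cases he with
              | inl h => exact hent e h
              | inr h => omega)
            (by
              have := pvV_push (xl.length + 1) yl.length s xi (by omega) (by omega)
              omega)]
          rw [pvAlts_concat, hlen, hxdrop, hydrop, pvConv_cons, hm, ← hydrop]
          cases pvConv (xl.drop (xi + 1)) (yl.drop (yi + 1)) <;>
            cases pvConv (xl.drop (xi + 1)) (yl.drop yi) <;>
            cases pvAlts xl yl s <;> simp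
        · simp only [hm, Bool.false_eq_true, if_false]
          by_cases hu : PySem.Chars.isupper xl[xi]
          · simp only [hu, if_true]
            by_cases hs0 : s = []
            · subst hs0
              have hm0 : yl.length ≠ 0 := by simp at hlen; omega
              simp only [List.length_nil, beq_self_eq_true, if_true]
              rw [hxdrop, hydrop, pvConv_cons]
              simp [pvAlts_nil, show (0 == yl.length) = false by simp [Ne.symm hm0], hm, hu]
            · rcases List.eq_nil_or_concat s with h' | ⟨s', p, h'⟩
              · exact absurd h' hs0
              rw [List.concat_eq_append] at h'
              subst h'
              have hplt : p < xl.length := hent p (by simp)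
              simp only [show ((s' ++ [p]).length == 0) = false by simp, Bool.false_eq_true,
                if_false, List.getLastD_concat, List.dropLast_concat]
              rw [ih (p + 1) (yi - 1) s' (by omega) (by simp at hlen; omega) (by omega)
                (fun e he => hent e (by simp [he]))
                (by
                  have := pvV_pop (xl.length + 1) yl.length s' p xi (by omega)
                    (by simp at hlen; omega)
                  omega)]
              rw [pvAlts_concat, hxdrop, hydrop, pvConv_cons]
              have : s'.length = yi - 1 := by simp at hlen; omega
              rw [this]
              simp only [hm, hu]
              cases pvConv (xl.drop (p + 1)) (yl.drop (yi - 1)) <;>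
                cases pvAlts xl yl s' <;> simp
          · simp only [hu, Bool.false_eq_true, if_false]
            rw [ih (xi + 1) yi s (by omega) hlen (by omega) hent
              (by
                have := pvV_skip (xl.length + 1) yl.length s xi (by omega)
                omega)]
            rw [hxdrop, hydrop, pvConv_cons, ← hydrop]
            simp [hm, hu]

theorem pvTestBit_shiftLeft_one (j' j : Nat) : (1 <<< j').testBit j = decide (j = j') := by
  rw [Nat.shiftLeft_eq, one_mul, Nat.testBit_two_pow]
  simp [eq_comm]

theorem pvTestBit_one (j : Nat) : (1 : Nat).testBit j = decide (j = 0) := by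
  have : ((2 : Nat) ^ 0).testBit j = decide ((0 : Nat) = j) := Nat.testBit_two_pow
  simpa [eq_comm] using this

theorem pvAnd_goal_ne (a m : Nat) : (a &&& (1 <<< m) ≠ 0) ↔ a.testBit m = true := by
  constructor
  · intro h
    by_contra hb
    apply h
    apply Nat.zero_of_testBit_eq_false
    intro j
    rw [Nat.testBit_and, pvTestBit_shiftLeft_one]
    by_cases hj : j = m
    · subst hj; simp_all
    · simp [hj]
  · intro h hz
    have hm : (a &&& (1 <<< m)).testBit m = true := by
      rw [Nat.testBit_and, h, pvTestBit_shiftLeft_one]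
      simp
    rw [hz] at hm
    simp at hm

theorem pvMasks_build (l : List (Char × Nat)) (c : Char) (j : Nat) :
    ∀ d : PySem.Dict Char Nat,
      (((l.foldl (fun d p => d.insert p.1 (d.getD p.1 0 ||| (1 <<< p.2))) d).getD c 0).testBit j)
        = ((d.getD c 0).testBit j || decide ((c, j) ∈ l)) := by
  induction l with
  | nil => intro d; simp
  | cons p l ih =>
    intro d
    rw [List.foldl_cons, ih]
    have hstep : ((d.insert p.1 (d.getD p.1 0 ||| (1 <<< p.2))).getD c 0).testBit j
        = ((d.getD c 0).testBit j || decide ((c, j) = p)) := by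
      rw [PySem.Dict.getD_insert]
      by_cases hc : c = p.1
      · rw [if_pos hc, Nat.testBit_or, pvTestBit_shiftLeft_one]
        simp [hc, Prod.ext_iff]
      · rw [if_neg hc]
        simp [hc, Prod.ext_iff]
    rw [hstep, Bool.or_assoc]
    congr 1
    simp [List.mem_cons]


theorem pvMasks_spec (yl : List Char) (c : Char) (j : Nat) :
    ((pvMasks yl).getD c 0).testBit j = decide (yl[j]? = some c) := by
  unfold pvMasks
  rw [pvMasks_build]
  simp [List.mk_mem_zipIdx_iff_getElem?]

theorem pvLoopB_iff (yl : List Char) :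
    ∀ (r : List Char) (reach : Nat),
      (∀ j, reach.testBit j = true → j < yl.length) →
      (pvLoopB yl.length (pvMasks yl) r reach = true ↔
        ∃ j, reach.testBit j = true ∧ pvConv r (yl.drop j) = true) := by
  intro r
  induction r with
  | nil =>
    intro reach hS
    simp only [pvLoopB, Bool.false_eq_true, false_iff]
    rintro ⟨j, hb, hc⟩
    rw [List.drop_eq_getElem_cons (hS j hb), pvConv_nil_cons] at hc
    exact absurd hc (by simp)
  | cons a r ih =>
    intro reach hS
    rw [pvLoopB]
    set mask := (pvMasks yl).getD (PySem.Chars.upperChar a) 0 with hmaskdef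
    set reach' := ((reach &&& mask) <<< 1) |||
      (if PySem.Chars.isupper a then reach &&& mask else reach) with hreach'
    have hmask : ∀ j, mask.testBit j = decide (yl[j]? = some (PySem.Chars.upperChar a)) :=
      fun j => pvMasks_spec yl (PySem.Chars.upperChar a) j
    have hbit : ∀ j, reach'.testBit j =
        ((decide (1 ≤ j) && (reach.testBit (j - 1) && mask.testBit (j - 1))) ||
         (if PySem.Chars.isupper a then reach.testBit j && mask.testBit j
          else reach.testBit j)) := by
      intro j
      rw [hreach', Nat.testBit_or, Nat.testBit_shiftLeft, Nat.testBit_and]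
      congr 1
      by_cases hu : PySem.Chars.isupper a
      · simp [hu, Nat.testBit_and]
      · simp [hu]
    by_cases hg : reach' &&& (1 <<< yl.length) ≠ 0
    · rw [if_pos hg]
      simp only [true_iff]
      have hbm : reach'.testBit yl.length = true := (pvAnd_goal_ne _ _).mp hg
      rw [hbit] at hbm
      have hmaskm : mask.testBit yl.length = false := by
        rw [hmask]; simp
      have hreachm : reach.testBit yl.length = false := by
        by_cases h : reach.testBit yl.length = true
        · exact absurd (hS _ h) (lt_irrefl _)
        · simpa using h
      have hmatched : 1 ≤ yl.length ∧ reach.testBit (yl.length - 1) = true ∧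
          mask.testBit (yl.length - 1) = true := by
        by_cases hu : PySem.Chars.isupper a <;>
          simp [hu, hmaskm, hreachm] at hbm <;> tauto
      obtain ⟨hm1, hrb, hmb⟩ := hmatched
      refine ⟨yl.length - 1, hrb, ?_⟩
      have hjm : yl.length - 1 < yl.length := by omega
      rw [hmask] at hmb
      have hy : yl[yl.length - 1]? = some (PySem.Chars.upperChar a) := by simpa using hmb
      have hy' : yl[yl.length - 1] = PySem.Chars.upperChar a := by
        have := List.getElem?_eq_getElem hjm
        rw [this] at hy; exact Option.some.inj hy
      rw [List.drop_eq_getElem_cons hjm]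
      have : yl.drop (yl.length - 1 + 1) = [] := by
        have : yl.length - 1 + 1 = yl.length := by omega
        rw [this, List.drop_length]
      rw [this, pvConv_cons, hy', pvConv_nil_right]
      simp
    · rw [if_neg hg]
      have hgm : reach'.testBit yl.length = false := by
        by_cases h : reach'.testBit yl.length = true
        · exact absurd ((pvAnd_goal_ne _ _).mpr h) hg
        · simpa using h
      have hS' : ∀ j, reach'.testBit j = true → j < yl.length := by
        intro j hj
        by_cases hjm : j = yl.length
        · rw [hjm] at hj; rw [hgm] at hj; exact absurd hj (by simp)
        · rw [hbit] at hj
          have : j - 1 < yl.length ∨ j < yl.length := by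
            rcases Bool.or_eq_true_iff.mp hj with h | h
            · left
              have hmb : mask.testBit (j - 1) = true := by
                rcases Bool.and_eq_true_iff.mp h with ⟨_, h2⟩
                exact (Bool.and_eq_true_iff.mp h2).2
              rw [hmask] at hmb
              have : yl[j-1]? = some (PySem.Chars.upperChar a) := by simpa using hmb
              exact (List.getElem?_eq_some_iff.mp this).1
            · right
              by_cases hu : PySem.Chars.isupper a
              · rw [if_pos hu] at h
                exact hS j (Bool.and_eq_true_iff.mp h).1
              · rw [if_neg hu] at h
                exact hS j h
          omega
      rw [ih reach' hS']
      constructor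
      · rintro ⟨j, hb, hc⟩
        rw [hbit] at hb
        rcases Bool.or_eq_true_iff.mp hb with h | h
        · obtain ⟨h1, h2⟩ := Bool.and_eq_true_iff.mp h
          obtain ⟨hrb, hmb⟩ := Bool.and_eq_true_iff.mp h2
          have hj1 : 1 ≤ j := by simpa using h1
          rw [hmask] at hmb
          have hy : yl[j-1]? = some (PySem.Chars.upperChar a) := by simpa using hmb
          have hjm : j - 1 < yl.length := (List.getElem?_eq_some_iff.mp hy).1
          have hy' : yl[j-1] = PySem.Chars.upperChar a := by
            have := List.getElem?_eq_getElem hjm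
            rw [this] at hy; exact Option.some.inj hy
          refine ⟨j - 1, hrb, ?_⟩
          rw [List.drop_eq_getElem_cons hjm, pvConv_cons, hy']
          have : j - 1 + 1 = j := by omega
          rw [this, hc]
          simp
        · by_cases hu : PySem.Chars.isupper a
          · rw [if_pos hu] at h
            obtain ⟨hrb, hmb⟩ := Bool.and_eq_true_iff.mp h
            have hjm : j < yl.length := hS j hrb
            rw [hmask] at hmb
            have hy : yl[j]? = some (PySem.Chars.upperChar a) := by simpa using hmb
            have hy' : yl[j] = PySem.Chars.upperChar a := by
              have := List.getElem?_eq_getElem hjm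
              rw [this] at hy; exact Option.some.inj hy
            refine ⟨j, hrb, ?_⟩
            have hc2 : pvConv r (yl[j] :: yl.drop (j+1)) = true := by
              rw [← List.drop_eq_getElem_cons hjm]; exact hc
            rw [hy'] at hc2
            rw [List.drop_eq_getElem_cons hjm, pvConv_cons]
            simp [hy', hc2]
          · rw [if_neg hu] at h
            have hjm : j < yl.length := hS j h
            refine ⟨j, h, ?_⟩
            rw [List.drop_eq_getElem_cons hjm, pvConv_cons]
            simp only [Bool.or_eq_true, Bool.and_eq_true]
            right
            constructor
            · simp [hu]
            · rw [← List.drop_eq_getElem_cons hjm]; exact hc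
      · rintro ⟨j, hb, hc⟩
        have hjm : j < yl.length := hS j hb
        rw [List.drop_eq_getElem_cons hjm, pvConv_cons] at hc
        rcases Bool.or_eq_true_iff.mp hc with h | h
        · obtain ⟨hbeq, hcv⟩ := Bool.and_eq_true_iff.mp h
          have hy : yl[j] = PySem.Chars.upperChar a := (beq_iff_eq.mp hbeq).symm
          refine ⟨j + 1, ?_, by simpa using hcv⟩
          rw [hbit]
          have hmb : mask.testBit j = true := by
            rw [hmask]
            simp [List.getElem?_eq_getElem hjm, hy]
          simp [hb, hmb]
        · obtain ⟨hsk, hcv⟩ := Bool.and_eq_true_iff.mp h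
          refine ⟨j, ?_, by rw [List.drop_eq_getElem_cons hjm]; exact hcv⟩
          rw [hbit]
          by_cases hu : PySem.Chars.isupper a
          · have hbeq : (PySem.Chars.upperChar a == yl[j]) = true := by
              rcases Bool.or_eq_true_iff.mp hsk with h' | h'
              · rw [hu] at h'; exact absurd h' (by simp)
              · exact h'
            have hmb : mask.testBit j = true := by
              rw [hmask]
              simp [List.getElem?_eq_getElem hjm, (beq_iff_eq.mp hbeq).symm]
            simp [hu, hb, hmb]
          · simp [hu, hb]

theorem alt_eq_pvConv (x y : String) :
    is_string_convertable_alt x y = pvConv x.toList y.toList := by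
  unfold is_string_convertable_alt
  by_cases hm : y.toList.length = 0
  · rw [List.length_eq_zero_iff] at hm
    rw [hm]
    simp [pvConv_nil_right]
  · rw [if_neg (by simpa using hm)]
    have h1 : ∀ j, (1 : Nat).testBit j = true → j < y.toList.length := by
      intro j hj
      rw [pvTestBit_one] at hj
      have : j = 0 := by simpa using hj
      omega
    have hiff := pvLoopB_iff y.toList x.toList 1 h1
    have : pvLoopB y.toList.length (pvMasks y.toList) x.toList 1 = true ↔
        pvConv x.toList y.toList = true := by
      rw [hiff]
      constructor
      · rintro ⟨j, hb, hc⟩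
        rw [pvTestBit_one] at hb
        have : j = 0 := by simpa using hb
        subst this
        simpa using hc
      · intro h
        exact ⟨0, by simp, by simpa using h⟩
    cases hh : pvConv x.toList y.toList
    · rw [hh] at this
      simp only [Bool.false_eq_true, iff_false, Bool.not_eq_true] at this
      exact this
    · rw [hh] at this
      simp only [iff_true] at this
      exact this

-- ===== VERDICT (by name: the statement is the Claim_ definition above) =====
theorem is_string_convertable_spec : Claim_equal_is_string_convertable := by
  intro x y _
  unfold Spec_is_string_convertable
  rw [alt_eq_pvConv]
  unfold is_string_convertable
  rw [pvLoopA_eq x.toList y.toList _ 0 0 [] (by omega) rfl (by omega) (by simp)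
    (by
      have hV : pvV (x.toList.length + 1) y.toList.length [] 0 = 0 := by simp [pvV, pvF]
      have hle : (x.toList.length + 1) ^ (y.toList.length + 1)
          ≤ (x.toList.length + 1) ^ (y.toList.length + 2) :=
        Nat.pow_le_pow_right (by omega) (by omega)
      omega)]
  simp [pvAlts_nil]
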